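-- pv_equiv track=rewrite | github.com/strictlex/Task_HT | task1/task1.py | circle_massiv
-- ===== SOURCE A (Python) =====
-- def circle_massiv(n, m):
--     if n <= 0 or m <= 0:
--         raise ValueError("Длина массива и шаг должны быть положительными числами")
--     if m > n:
--         raise ValueError("Длина шага не может быть больше самого массива")
--
--     lst = list(range(1, n + 1))
--     circle = lst.copy()
--     circle_m = []
--     for i in circle:
--         circle_m.append(circle[:m])
--         circle = circle[m - 1 :] + circle[: m - 1]
--         if circle_m[-1][-1] == lst[0]:
--             break
--     answer = ""
--     for el in circle_m:
--         answer += str(el[0])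
--     return answer
-- ===== SOURCE B (Python) =====
-- def circle_massiv(n, m):
--     if n <= 0 or m <= 0:
--         raise ValueError("Длина массива и шаг должны быть положительными числами")
--     if m > n:
--         raise ValueError("Длина шага не может быть больше самого массива")
--     parts = []
--     for k in range(n):
--         parts.append(str(k * (m - 1) % n + 1))
--         if (k + 1) * (m - 1) % n == 0:
--             break
--     return "".join(parts)
-- ===== Notes on version B (the rewrite author's own statement) =====
-- stated objective: faster
-- what changed: B drops A's materialized list and its per-step O(n) slicing/rotation (circle = circle[m-1:] + circle[:m-1]) and instead computes each emitted element and the break condition directly by modular arithmetic: step k emits k*(m-1) % n + 1 and stops when (k+1)*(m-1) % n == 0.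
import Mathlib
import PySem

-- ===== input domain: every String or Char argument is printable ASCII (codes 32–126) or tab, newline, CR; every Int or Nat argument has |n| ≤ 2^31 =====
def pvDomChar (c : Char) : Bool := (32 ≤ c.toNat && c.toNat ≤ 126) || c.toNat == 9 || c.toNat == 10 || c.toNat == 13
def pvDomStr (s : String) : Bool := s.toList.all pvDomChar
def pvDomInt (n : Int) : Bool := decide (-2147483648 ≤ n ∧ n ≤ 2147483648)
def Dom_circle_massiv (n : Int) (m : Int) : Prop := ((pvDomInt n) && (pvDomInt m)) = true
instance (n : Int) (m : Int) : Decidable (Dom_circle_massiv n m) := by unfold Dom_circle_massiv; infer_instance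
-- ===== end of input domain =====

-- B replaces A's repeated list slicing/rotation by pure modular index arithmetic (O(n) instead of O(n^2)); return value proved equal on Pre_ (1 ≤ m ≤ n; outside it A raises ValueError).

-- ===== PORT A =====
-- the 'for i in circle' loop: the iterator list (bound at loop entry) is carried literally;
-- 'circle' and 'circle_m' are the mutated state
def pvLoopA (m : Int) (lst : List Int) : List Int → List Int → List (List Int) → List (List Int)
  | [], _, acc => acc
  | _ :: rest, circle, acc =>
    let sl := PySem.List.slice circle none (some m)
    let circle' := PySem.List.slice circle (some (m - 1)) none ++ PySem.List.slice circle none (some (m - 1))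
    let acc' := acc ++ [sl]
    if PySem.List.pyGet? sl (-1) = PySem.List.pyGet? lst 0 then acc'
    else pvLoopA m lst rest circle' acc'

-- str(el[0]); el[0] cannot raise inside Pre_, the none branch is unreachable there
def pvFirstStr (el : List Int) : String :=
  match PySem.List.pyGet? el 0 with
  | some v => PySem.Int.toStr v
  | none => ""

def circle_massiv (n : Int) (m : Int) : String :=
  let lst := PySem.List.pyRange 1 (n + 1) 1
  let cm := pvLoopA m lst lst lst []
  cm.foldl (fun a el => a ++ pvFirstStr el) ""

-- ===== PORT B =====
-- 'for k in range(n)' appending str(k*(m-1) % n + 1), breaking when (k+1)*(m-1) % n == 0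
def pvLoopB (n m : Int) : List Int → List String → List String
  | [], acc => acc
  | k :: rest, acc =>
    let acc' := acc ++ [PySem.Int.toStr (PySem.Int.mod (k * (m - 1)) n + 1)]
    if PySem.Int.mod ((k + 1) * (m - 1)) n = 0 then acc'
    else pvLoopB n m rest acc'

def circle_massiv_alt (n : Int) (m : Int) : String :=
  PySem.Str.join "" (pvLoopB n m (PySem.List.pyRange 0 n 1) [])

-- ===== PRECONDITION & SPEC =====
-- exactly the inputs on which A returns (otherwise A raises ValueError)
def Pre_circle_massiv (n : Int) (m : Int) : Prop := 1 ≤ m ∧ m ≤ n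
instance (n : Int) (m : Int) : Decidable (Pre_circle_massiv n m) := by unfold Pre_circle_massiv; infer_instance
def pvWitness_circle_massiv : Int × Int := (5, 2)

def Spec_circle_massiv (n : Int) (m : Int) (out : String) : Prop := out = circle_massiv_alt n m
instance (n : Int) (m : Int) (out : String) : Decidable (Spec_circle_massiv n m out) := by unfold Spec_circle_massiv; infer_instance

-- ===== CLAIM (what is proved, stated in full; the proofs are below) =====
def Claim_equal_circle_massiv : Prop := ∀ (n : Int) (m : Int), Dom_circle_massiv n m → Pre_circle_massiv n m → Spec_circle_massiv n m (circle_massiv n m)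

-- ===== LEMMAS AND PROOFS =====

-- the array [1, …, N]
def pvLst (N : Nat) : List Int := PySem.List.pyRange 1 ((N : Int) + 1) 1

-- left rotation by r
def pvRot (r : Nat) (l : List Int) : List Int := l.drop r ++ l.take r

theorem pvLst_length (N : Nat) : (pvLst N).length = N := by
  simp [pvLst, PySem.List.length_pyRange_one]

theorem pvRot_length (r : Nat) (l : List Int) : (pvRot r l).length = l.length := by
  simp [pvRot]; omega

theorem pvRot_zero (l : List Int) : pvRot 0 l = l := by simp [pvRot]

theorem pvLst_getElem (N k : Nat) (h : k < (pvLst N).length) :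
    (pvLst N)[k] = 1 + (k : Int) := by
  exact PySem.List.getElem_pyRange_one 1 ((N : Int) + 1) k h

theorem pvRot_getElem? (l : List Int) (r i : Nat) (hr : r < l.length) (hi : i < l.length) :
    (pvRot r l)[i]? = l[(r + i) % l.length]? := by
  unfold pvRot
  rcases lt_or_ge i (l.length - r) with hcase | hcase
  · rw [List.getElem?_append_left (by simp [List.length_drop]; omega)]
    rw [List.getElem?_drop]
    rw [Nat.mod_eq_of_lt (by omega)]
  · rw [List.getElem?_append_right (by simp [List.length_drop]; omega)]
    rw [List.getElem?_take, if_pos (by simp [List.length_drop]; omega)]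
    have hmod : (r + i) % l.length = r + i - l.length := by
      rw [Nat.mod_eq_sub_mod (by omega)]
      exact Nat.mod_eq_of_lt (by omega)
    rw [hmod]
    congr 1
    simp [List.length_drop]
    omega

theorem pvRot_rot (l : List Int) (a b : Nat) (ha : a < l.length) (hb : b < l.length) :
    pvRot a (pvRot b l) = pvRot ((a + b) % l.length) l := by
  have hN : 0 < l.length := by omega
  apply List.ext_getElem?
  intro i
  by_cases hi : i < l.length
  · rw [pvRot_getElem? (pvRot b l) a i (by rwa [pvRot_length]) (by rwa [pvRot_length])]
    rw [pvRot_length]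
    rw [pvRot_getElem? l b ((a + i) % l.length) hb (Nat.mod_lt _ hN)]
    rw [pvRot_getElem? l ((a + b) % l.length) i (Nat.mod_lt _ hN) hi]
    rw [Nat.add_mod_mod, Nat.mod_add_mod]
    congr 2
    ring
  · rw [List.getElem?_eq_none (by rw [pvRot_length, pvRot_length]; omega)]
    rw [List.getElem?_eq_none (by rw [pvRot_length]; omega)]

theorem pvPyGet_zero (l : List Int) (hl : 0 < l.length) :
    PySem.List.pyGet? l 0 = l[0]? := by
  simp [PySem.List.pyGet?, PySem.List.pyIdx?, hl]

theorem pvPyGet_neg_one (l : List Int) (hl : 0 < l.length) :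
    PySem.List.pyGet? l (-1) = l[l.length - 1]? := by
  have h1 : -(l.length : Int) ≤ -1 := by omega
  simp [PySem.List.pyGet?, PySem.List.pyIdx?, h1]

theorem pvCharsJoinNil (L : List (List Char)) : PySem.Chars.join [] L = L.flatten := by
  induction L with
  | nil => simp [PySem.Chars.join, List.intercalate]
  | cons p rest ih =>
    cases rest with
    | nil => simp [PySem.Chars.join, List.intercalate]
    | cons q r =>
      rw [PySem.Chars.join_cons_cons]
      simp only [List.flatten_cons]
      rw [ih]
      simp

theorem pvFoldA (cm : List (List Int)) (s : String) :
    (cm.foldl (fun a el => a ++ pvFirstStr el) s).toList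
      = s.toList ++ ((cm.map pvFirstStr).map String.toList).flatten := by
  induction cm generalizing s with
  | nil => simp
  | cons p rest ih =>
    simp only [List.foldl_cons, List.map_cons, List.flatten_cons]
    rw [ih, String.toList_append, List.append_assoc]

theorem pvRotLst_getElem? (N r i : Nat) (hr : r < N) (hi : i < N) :
    (pvRot r (pvLst N))[i]? = some (1 + (((r + i) % N : Nat) : Int)) := by
  have h1 := pvRot_getElem? (pvLst N) r i (by rw [pvLst_length]; omega) (by rw [pvLst_length]; omega)
  rw [pvLst_length] at h1
  rw [h1]
  rw [List.getElem?_eq_getElem (by rw [pvLst_length]; exact Nat.mod_lt _ (by omega))]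
  rw [pvLst_getElem]

-- the heart: A's loop state after j steps is the rotation by j*(M-1) mod N, and the
-- string appended / break tested at step j match B's modular-arithmetic loop
theorem pvMain (N M : Nat) (hM : 1 ≤ M) (hMN : M ≤ N)
    (iterA : List Int) (j : Nat) (hj : j < N) (hlen : iterA.length = N - j)
    (accA : List (List Int)) (accB : List String)
    (hacc : accA.map pvFirstStr = accB) :
    (pvLoopA (M : Int) (pvLst N) iterA (pvRot ((j * (M - 1)) % N) (pvLst N)) accA).map pvFirstStr
      = pvLoopB (N : Int) (M : Int) (PySem.List.pyRange (j : Int) (N : Int) 1) accB := by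
  induction iterA generalizing j accA accB with
  | nil => simp at hlen; omega
  | cons x rest ih =>
    have hN : 0 < N := by omega
    have hr : (j * (M - 1)) % N < N := Nat.mod_lt _ hN
    have hlstlen : (pvLst N).length = N := pvLst_length N
    have hclen : (pvRot ((j * (M - 1)) % N) (pvLst N)).length = N := by
      rw [pvRot_length, hlstlen]
    set lst := pvLst N with hlst
    set circle := pvRot ((j * (M - 1)) % N) lst with hcircle
    -- the slice taken and the rotated list
    have hMcast : ((M : Int)).toNat = M := Int.toNat_natCast M
    have hM1cast : ((M : Int) - 1) = ((M - 1 : Nat) : Int) := by omega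
    have hsl : PySem.List.slice circle none (some (M : Int)) = circle.take M := by
      rw [PySem.List.slice_to circle (by positivity), hMcast]
    have hslice_from : PySem.List.slice circle (some ((M : Int) - 1)) none = circle.drop (M - 1) := by
      rw [hM1cast, PySem.List.slice_from circle (by positivity), Int.toNat_natCast]
    have hslice_to : PySem.List.slice circle none (some ((M : Int) - 1)) = circle.take (M - 1) := by
      rw [hM1cast, PySem.List.slice_to circle (by positivity), Int.toNat_natCast]
    have hcircle' : circle.drop (M - 1) ++ circle.take (M - 1)
        = pvRot (((j + 1) * (M - 1)) % N) lst := by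
      show pvRot (M - 1) circle = _
      rw [hcircle, pvRot_rot lst (M - 1) ((j * (M - 1)) % N) (by omega) (by omega)]
      congr 1
      rw [hlstlen]
      conv_lhs => rw [Nat.add_mod_mod]
      ring_nf
    have hsllen : (circle.take M).length = M := by
      rw [List.length_take, hclen, min_eq_left hMN]
    -- value appended at this step
    have hsl0 : (circle.take M)[0]? = some (1 + (((j * (M - 1)) % N : Nat) : Int)) := by
      rw [List.getElem?_take, if_pos (by omega), hcircle]
      have h2 := pvRotLst_getElem? N ((j * (M - 1)) % N) 0 hr hN
      rwa [Nat.add_zero, Nat.mod_eq_of_lt hr] at h2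
    have hfirst : pvFirstStr (circle.take M)
        = PySem.Int.toStr (PySem.Int.mod ((j : Int) * ((M : Int) - 1)) (N : Int) + 1) := by
      unfold pvFirstStr
      rw [pvPyGet_zero _ (by omega), hsl0]
      have : PySem.Int.mod ((j : Int) * ((M : Int) - 1)) (N : Int)
          = ((j * (M - 1)) % N : Nat) := by
        rw [hM1cast]
        rw [show (j : Int) * ((M - 1 : Nat) : Int) = ((j * (M - 1) : Nat) : Int) by push_cast; ring]
        exact PySem.Int.mod_natCast _ _
      rw [this, Int.add_comm]
    -- the two break conditions agree
    have hlast : PySem.List.pyGet? (circle.take M) (-1)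
        = some ((1 : Int) + (((((j * (M - 1)) % N + (M - 1)) % N : Nat)) : Int)) := by
      rw [pvPyGet_neg_one _ (by omega), hsllen]
      rw [List.getElem?_take, if_pos (by omega), hcircle]
      exact pvRotLst_getElem? N ((j * (M - 1)) % N) (M - 1) hr (by omega)
    have hlst0 : PySem.List.pyGet? lst 0 = some 1 := by
      rw [pvPyGet_zero _ (by omega), List.getElem?_eq_getElem (by omega), pvLst_getElem]
      simp
    have hcondA : (PySem.List.pyGet? (circle.take M) (-1) = PySem.List.pyGet? lst 0)
        ↔ ((j + 1) * (M - 1)) % N = 0 := by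
      rw [hlast, hlst0]
      have harith : ((j * (M - 1)) % N + (M - 1)) % N = ((j + 1) * (M - 1)) % N := by
        conv_lhs => rw [Nat.mod_add_mod]
        ring_nf
      rw [harith]
      constructor
      · intro h
        have := Option.some.inj h
        omega
      · intro h
        rw [h]
        simp
    have hcondB : (PySem.Int.mod (((j : Int) + 1) * ((M : Int) - 1)) (N : Int) = 0)
        ↔ ((j + 1) * (M - 1)) % N = 0 := by
      rw [hM1cast]
      rw [show ((j : Int) + 1) * ((M - 1 : Nat) : Int) = (((j + 1) * (M - 1) : Nat) : Int) by
        push_cast; ring]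
      rw [PySem.Int.mod_natCast]
      exact_mod_cast Int.natCast_eq_zero
    -- unfold one step of both loops
    rw [show PySem.List.pyRange (j : Int) (N : Int) 1
        = (j : Int) :: PySem.List.pyRange ((j : Int) + 1) (N : Int) 1 from
      PySem.List.pyRange_one_cons (by exact_mod_cast hj)]
    simp only [pvLoopA, pvLoopB, hsl, hslice_from, hslice_to]
    by_cases hQ : ((j + 1) * (M - 1)) % N = 0
    · rw [if_pos (hcondA.mpr hQ), if_pos (hcondB.mpr hQ)]
      rw [List.map_append, hacc, List.map_singleton, hfirst]
    · rw [if_neg (fun h => hQ (hcondA.mp h)), if_neg (fun h => hQ (hcondB.mp h))]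
      have hj1 : j + 1 < N := by
        rcases Nat.lt_or_ge (j + 1) N with h | h
        · exact h
        · exfalso
          apply hQ
          have hjN : j + 1 = N := by omega
          rw [hjN]
          exact Nat.mul_mod_right N (M - 1)
      rw [hcircle']
      rw [show ((j : Int) + 1) = ((j + 1 : Nat) : Int) by push_cast; ring]
      exact ih (j + 1) hj1 (by simp at hlen ⊢; omega) (accA ++ [circle.take M])
        (accB ++ [PySem.Int.toStr (PySem.Int.mod ((j : Int) * ((M : Int) - 1)) (N : Int) + 1)])
        (by rw [List.map_append, hacc, List.map_singleton, hfirst])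

-- ===== VERDICT (by name: the statement is the Claim_ definition above) =====
theorem circle_massiv_spec : Claim_equal_circle_massiv := by
  intro n m _ hpre
  obtain ⟨hm, hmn⟩ := hpre
  have hn : n = ((n.toNat : Nat) : Int) := by omega
  have hmm : m = ((m.toNat : Nat) : Int) := by omega
  have hM1 : 1 ≤ m.toNat := by omega
  have hMN : m.toNat ≤ n.toNat := by omega
  unfold Spec_circle_massiv
  rw [hn, hmm]
  simp only [circle_massiv, circle_massiv_alt]
  have hmain := pvMain n.toNat m.toNat hM1 hMN (pvLst n.toNat) 0 (by omega)
    (by rw [pvLst_length]; omega) [] [] rfl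
  rw [Nat.zero_mul, Nat.zero_mod, pvRot_zero, Nat.cast_zero] at hmain
  unfold pvLst at hmain
  apply String.toList_inj.mp
  rw [pvFoldA, PySem.Str.toList_join]
  rw [show ("".toList) = ([] : List Char) from rfl]
  rw [pvCharsJoinNil, hmain]
  simp
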